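-- pv_equiv track=rewrite | github.com/hayayemeren/Cube | visualdetectionlive.py | sort_detected
-- ===== SOURCE A (Python) =====
-- def sort_detected(detected):
--     # Sort top-to-bottom first
--     detected = sorted(detected, key=lambda item: item[1])
--
--     rows = []
--     current_row = []
--     last_y = None
--     threshold = 50  # Tolerance for same-row grouping
--
--     for item in detected:
--         x, y, color_name = item
--         if last_y is None:
--             last_y = y
--
--         if abs(y - last_y) > threshold:
--             rows.append(sorted(current_row, key=lambda item: item[0]))
--             current_row = []
--             last_y = y
--
--         current_row.append(item)
--
--     if current_row:
--         rows.append(sorted(current_row, key=lambda item: item[0]))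
--
--     sorted_colors = [color_name for row in rows for (_, _, color_name) in row]
--     return sorted_colors
-- ===== SOURCE B (Python) =====
-- def sort_detected(detected):
--     # Tag each item with a row index in one pass over the y-sorted list,
--     # then do a single stable sort by (row, x) and flatten to color names.
--     items = sorted(detected, key=lambda it: it[1])
--     tagged = []
--     row = 0
--     row_y = None
--     for it in items:
--         if row_y is None:
--             row_y = it[1]
--         elif abs(it[1] - row_y) > 50:
--             row += 1
--             row_y = it[1]
--         tagged.append((row, it))
--     tagged.sort(key=lambda t: (t[0], t[1][0]))
--     return [it[2] for _, it in tagged]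
-- ===== Notes on version B (the rewrite author's own statement) =====
-- stated objective: alternative
-- what changed: Replaces A's interleaved row accumulation with per-row sorts by a one-pass row-index tagging followed by a single stable sort on the key (row, x).
import Mathlib
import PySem

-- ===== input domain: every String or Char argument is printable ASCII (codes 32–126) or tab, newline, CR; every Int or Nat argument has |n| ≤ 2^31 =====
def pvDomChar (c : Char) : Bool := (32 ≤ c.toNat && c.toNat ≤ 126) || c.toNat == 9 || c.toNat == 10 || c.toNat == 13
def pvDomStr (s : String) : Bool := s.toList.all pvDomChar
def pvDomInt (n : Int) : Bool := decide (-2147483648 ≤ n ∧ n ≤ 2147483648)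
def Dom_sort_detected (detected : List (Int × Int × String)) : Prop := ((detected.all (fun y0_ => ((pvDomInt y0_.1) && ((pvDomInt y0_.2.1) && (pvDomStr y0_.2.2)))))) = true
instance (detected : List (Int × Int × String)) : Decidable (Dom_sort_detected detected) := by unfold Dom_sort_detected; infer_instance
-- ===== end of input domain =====

-- B tags each y-sorted item with a row index in one pass and then performs a single
-- stable sort by (row, x), instead of A's interleaved grouping with per-row sorts.

-- ===== PORT A =====
def sort_detected (detected : List (Int × Int × String)) : List String :=
  let detected := PySem.List.sorted detected (fun item => item.2.1)
  let st :=
    detected.foldl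
      (fun (st : List (List (Int × Int × String)) × List (Int × Int × String) × Option Int) item =>
        let rows := st.1
        let current_row := st.2.1
        -- "if last_y is None: last_y = y"
        let ly := st.2.2.getD item.2.1
        if (item.2.1 - ly).natAbs > 50 then
          (rows ++ [PySem.List.sorted current_row (fun it => it.1)], [item], some item.2.1)
        else
          (rows, current_row ++ [item], some ly))
      ([], [], none)
  let rows := if st.2.1 ≠ [] then st.1 ++ [PySem.List.sorted st.2.1 (fun it => it.1)] else st.1
  rows.flatMap (fun row => row.map (fun it => it.2.2))

-- ===== PORT B =====
def sort_detected_alt (detected : List (Int × Int × String)) : List String :=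
  let items := PySem.List.sorted detected (fun it => it.2.1)
  let st :=
    items.foldl
      (fun (st : List (Int × (Int × Int × String)) × Int × Option Int) it =>
        let tagged := st.1
        let row := st.2.1
        match st.2.2 with
        | none => (tagged ++ [(row, it)], row, some it.2.1)
        | some y0 =>
            if (it.2.1 - y0).natAbs > 50 then
              (tagged ++ [(row + 1, it)], row + 1, some it.2.1)
            else
              (tagged ++ [(row, it)], row, some y0))
      ([], 0, none)
  (PySem.List.sorted2 st.1 (fun t => t.1) (fun t => t.2.1)).map (fun t => t.2.2.2)

-- ===== PRECONDITION & SPEC =====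
def Spec_sort_detected (detected : List (Int × Int × String)) (out : List String) : Prop := out = sort_detected_alt detected
instance (detected : List (Int × Int × String)) (out : List String) : Decidable (Spec_sort_detected detected out) := by unfold Spec_sort_detected; infer_instance

-- ===== CLAIM (what is proved, stated in full; the proofs are below) =====
def Claim_equal_sort_detected : Prop := ∀ (detected : List (Int × Int × String)), Dom_sort_detected detected → Spec_sort_detected detected (sort_detected detected)

-- ===== LEMMAS AND PROOFS =====
abbrev PvIt : Type := Int × Int × String

def pvName (it : PvIt) : String := it.2.2

def pvSortX (g : List PvIt) : List PvIt := PySem.List.sorted g (fun it => it.1)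

def pvF (g : List PvIt) : List String := (pvSortX g).map pvName

def pvTakeRow (y0 : Int) : List PvIt → List PvIt × List PvIt
  | [] => ([], [])
  | a :: t =>
      if (a.2.1 - y0).natAbs > 50 then ([], a :: t)
      else ((a :: (pvTakeRow y0 t).1), (pvTakeRow y0 t).2)

theorem pvTakeRow_snd_length (y0 : Int) (l : List PvIt) :
    (pvTakeRow y0 l).2.length ≤ l.length := by
  induction l with
  | nil => simp [pvTakeRow]
  | cons a t ih =>
      simp only [pvTakeRow]
      split
      · simp
      · simpa using Nat.le_succ_of_le ih

def pvGroupRows : List PvIt → List (List PvIt)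
  | [] => []
  | a :: t => (a :: (pvTakeRow a.2.1 t).1) :: pvGroupRows (pvTakeRow a.2.1 t).2
termination_by l => l.length
decreasing_by
  exact Nat.lt_succ_of_le (pvTakeRow_snd_length _ _)

def pvOut (gs : List (List PvIt)) : List String := gs.flatMap pvF

-- ---------- generic insertion-sort lemmas ----------

theorem pvInsertBy_cons {α : Type} (before : α → α → Bool) (x y : α) (ys : List α) :
    PySem.List.insertBy before x (y :: ys) =
      if before x y then x :: y :: ys else y :: PySem.List.insertBy before x ys := rfl

theorem pvInsertBy_append {α : Type} (before : α → α → Bool) (x : α) (S t : List α)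
    (h : ∀ y ∈ S, before x y = false) :
    PySem.List.insertBy before x (S ++ t) = S ++ PySem.List.insertBy before x t := by
  induction S with
  | nil => simp
  | cons s S ih =>
      have hs : before x s = false := h s (by simp)
      simp only [List.cons_append, pvInsertBy_cons, hs, Bool.false_eq_true, if_false]
      rw [ih (fun y hy => h y (by simp [hy]))]

theorem pvFoldlIns_append {α : Type} (before : α → α → Bool) (l : List α) (S : List α)
    (h : ∀ x ∈ l, ∀ y ∈ S, before x y = false) :
    ∀ acc, l.foldl (fun acc x => PySem.List.insertBy before x acc) (S ++ acc)
      = S ++ l.foldl (fun acc x => PySem.List.insertBy before x acc) acc := by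
  induction l with
  | nil => intro acc; simp
  | cons a l ih =>
      intro acc
      simp only [List.foldl_cons]
      rw [pvInsertBy_append before a S _ (h a (by simp))]
      exact ih (fun x hx y hy => h x (by simp [hx]) y hy) _
  -- (stated with ∀ acc to get the right induction hypothesis)

theorem pvInsertBy_map {α β : Type} (before : α → α → Bool) (before' : β → β → Bool)
    (f : α → β) (h : ∀ a b, before' (f a) (f b) = before a b) (x : α) (ys : List α) :
    PySem.List.insertBy before' (f x) (ys.map f) = (PySem.List.insertBy before x ys).map f := by
  induction ys with
  | nil => rfl
  | cons y ys ih =>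
      simp only [List.map_cons, pvInsertBy_cons, h]
      split
      · simp
      · simp [ih]

theorem pvFoldlIns_map {α β : Type} (before : α → α → Bool) (before' : β → β → Bool)
    (f : α → β) (h : ∀ a b, before' (f a) (f b) = before a b) (l : List α) :
    ∀ acc, (l.map f).foldl (fun acc x => PySem.List.insertBy before' x acc) (acc.map f)
      = (l.foldl (fun acc x => PySem.List.insertBy before x acc) acc).map f := by
  induction l with
  | nil => intro acc; rfl
  | cons a l ih =>
      intro acc
      simp only [List.map_cons, List.foldl_cons]
      rw [pvInsertBy_map before before' f h, ih]

-- ---------- the lexicographic comparison used by sorted2 ----------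

def pvBlex (a b : Int × PvIt) : Bool :=
  decide (a.1 < b.1) || (!decide (b.1 < a.1) && decide (a.2.1 < b.2.1))

theorem pvSorted2_eq_foldl (xs : List (Int × PvIt)) :
    PySem.List.sorted2 xs (fun t => t.1) (fun t => t.2.1) =
      xs.foldl (fun acc x => PySem.List.insertBy pvBlex x acc) [] := rfl

theorem pvSortX_eq_foldl (g : List PvIt) :
    pvSortX g = g.foldl
      (fun acc x => PySem.List.insertBy (fun a b : PvIt => decide (a.1 < b.1)) x acc) [] := rfl

theorem pvSorted2_append (l₁ l₂ : List (Int × PvIt))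
    (h : ∀ x ∈ l₂, ∀ y ∈ l₁, pvBlex x y = false) :
    PySem.List.sorted2 (l₁ ++ l₂) (fun t => t.1) (fun t => t.2.1) =
      PySem.List.sorted2 l₁ (fun t => t.1) (fun t => t.2.1) ++
      PySem.List.sorted2 l₂ (fun t => t.1) (fun t => t.2.1) := by
  have hperm : (PySem.List.sorted2 l₁ (fun t => t.1) (fun t => t.2.1)).Perm l₁ :=
    PySem.List.sorted2_perm ..
  simp only [pvSorted2_eq_foldl, List.foldl_append]
  have := pvFoldlIns_append pvBlex l₂
      (l₁.foldl (fun acc x => PySem.List.insertBy pvBlex x acc) [])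
      (fun x hx y hy => h x hx y (by
        have : y ∈ PySem.List.sorted2 l₁ (fun t => t.1) (fun t => t.2.1) := by
          rw [pvSorted2_eq_foldl]; exact hy
        exact hperm.mem_iff.mp this)) []
  simpa using this

theorem pvSorted2_map_tag (i : Int) (g : List PvIt) :
    PySem.List.sorted2 (g.map (fun it => (i, it))) (fun t => t.1) (fun t => t.2.1) =
      (pvSortX g).map (fun it => (i, it)) := by
  have h : ∀ a b : PvIt, pvBlex (i, a) (i, b) = decide (a.1 < b.1) := by
    intro a b; simp [pvBlex]
  rw [pvSorted2_eq_foldl, pvSortX_eq_foldl]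
  have := pvFoldlIns_map (fun a b : PvIt => decide (a.1 < b.1)) pvBlex
      (fun it : PvIt => (i, it)) h g []
  simpa using this

-- ---------- row tagging ----------

def pvTagFrom (i : Int) : List (List PvIt) → List (Int × PvIt)
  | [] => []
  | g :: gs => g.map (fun it => (i, it)) ++ pvTagFrom (i + 1) gs

theorem pvTagFrom_lb (gs : List (List PvIt)) : ∀ (i : Int) (p : Int × PvIt),
    p ∈ pvTagFrom i gs → i ≤ p.1 := by
  induction gs with
  | nil => intro i p hp; simp [pvTagFrom] at hp
  | cons g gs ih =>
      intro i p hp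
      simp only [pvTagFrom, List.mem_append, List.mem_map] at hp
      rcases hp with ⟨it, _, rfl⟩ | hp
      · simp
      · exact le_trans (by omega) (ih (i + 1) p hp)

theorem pvSorted2_tagFrom (gs : List (List PvIt)) : ∀ (i : Int),
    (PySem.List.sorted2 (pvTagFrom i gs) (fun t => t.1) (fun t => t.2.1)).map
        (fun t => t.2.2.2) = pvOut gs := by
  induction gs with
  | nil => intro i; simp [pvTagFrom, pvOut, pvSorted2_eq_foldl]
  | cons g gs ih =>
      intro i
      have hsplit := pvSorted2_append (g.map (fun it => (i, it))) (pvTagFrom (i + 1) gs)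
        (by
          intro x hx y hy
          rcases List.mem_map.mp hy with ⟨it, _, rfl⟩
          have hx1 : i + 1 ≤ x.1 := pvTagFrom_lb gs (i + 1) x hx
          simp only [pvBlex]
          have h1 : ¬ (x.1 < i) := by omega
          have h2 : i < x.1 := by omega
          simp [h1, h2])
      simp only [pvTagFrom, hsplit, List.map_append, ih, pvSorted2_map_tag]
      simp [pvOut, pvF, pvName, List.map_map, Function.comp]

-- ---------- A-side loop characterisation ----------

def pvStepA (st : List (List PvIt) × List PvIt × Option Int) (item : PvIt) :
    List (List PvIt) × List PvIt × Option Int :=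
  let rows := st.1
  let current_row := st.2.1
  let ly := st.2.2.getD item.2.1
  if (item.2.1 - ly).natAbs > 50 then
    (rows ++ [PySem.List.sorted current_row (fun it => it.1)], [item], some item.2.1)
  else
    (rows, current_row ++ [item], some ly)

def pvFinishA (st : List (List PvIt) × List PvIt × Option Int) : List String :=
  (if st.2.1 ≠ [] then st.1 ++ [PySem.List.sorted st.2.1 (fun it => it.1)] else st.1).flatMap
    (fun row => row.map (fun it => it.2.2))

theorem pvSortDetected_eq (d : List PvIt) :
    sort_detected d =
      pvFinishA ((PySem.List.sorted d (fun item => item.2.1)).foldl pvStepA ([], [], none)) := rfl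

theorem pvLA (rest : List PvIt) : ∀ (rows : List (List PvIt)) (cur : List PvIt) (y0 : Int),
    cur ≠ [] →
    pvFinishA (rest.foldl pvStepA (rows, cur, some y0)) =
      rows.flatMap (fun r => r.map (fun it => it.2.2)) ++
        pvF (cur ++ (pvTakeRow y0 rest).1) ++
        pvOut (pvGroupRows (pvTakeRow y0 rest).2) := by
  induction rest with
  | nil =>
      intro rows cur y0 hcur
      simp [pvFinishA, hcur, pvTakeRow, pvGroupRows, pvOut, pvF, pvSortX, pvName]
  | cons a t ih =>
      intro rows cur y0 hcur
      by_cases h : (a.2.1 - y0).natAbs > 50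
      · have hstep : pvStepA (rows, cur, some y0) a =
            (rows ++ [PySem.List.sorted cur (fun it => it.1)], [a], some a.2.1) := by
          simp [pvStepA, h]
        rw [List.foldl_cons, hstep, ih _ [a] _ (by simp)]
        simp only [pvTakeRow, h, if_pos]
        rw [pvGroupRows]
        simp [pvOut, pvF, pvSortX, pvName, List.flatMap_cons, List.append_assoc]
      · have hstep : pvStepA (rows, cur, some y0) a = (rows, cur ++ [a], some y0) := by
          simp [pvStepA, h]
        rw [List.foldl_cons, hstep, ih _ _ _ (by simp)]
        simp only [pvTakeRow, h, if_false]
        simp [List.append_assoc]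

theorem pvA_out (d : List PvIt) :
    sort_detected d = pvOut (pvGroupRows (PySem.List.sorted d (fun item => item.2.1))) := by
  rw [pvSortDetected_eq]
  cases hys : PySem.List.sorted d (fun item => item.2.1) with
  | nil => simp [pvFinishA, pvGroupRows, pvOut]
  | cons a t =>
      have hstep : pvStepA ([], [], none) a = ([], [a], some a.2.1) := by
        simp [pvStepA]
      rw [List.foldl_cons, hstep, pvLA t [] [a] a.2.1 (by simp)]
      rw [pvGroupRows]
      simp [pvOut, List.flatMap_cons]

-- ---------- B-side loop characterisation ----------

def pvStepB (st : List (Int × PvIt) × Int × Option Int) (it : PvIt) :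
    List (Int × PvIt) × Int × Option Int :=
  let tagged := st.1
  let row := st.2.1
  match st.2.2 with
  | none => (tagged ++ [(row, it)], row, some it.2.1)
  | some y0 =>
      if (it.2.1 - y0).natAbs > 50 then
        (tagged ++ [(row + 1, it)], row + 1, some it.2.1)
      else
        (tagged ++ [(row, it)], row, some y0)

theorem pvSortDetectedAlt_eq (d : List PvIt) :
    sort_detected_alt d =
      (PySem.List.sorted2 ((PySem.List.sorted d (fun it => it.2.1)).foldl pvStepB ([], 0, none)).1
          (fun t => t.1) (fun t => t.2.1)).map (fun t => t.2.2.2) := rfl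

theorem pvLB (rest : List PvIt) : ∀ (tagged : List (Int × PvIt)) (row y0 : Int),
    (rest.foldl pvStepB (tagged, row, some y0)).1 =
      tagged ++ ((pvTakeRow y0 rest).1).map (fun it => (row, it)) ++
        pvTagFrom (row + 1) (pvGroupRows (pvTakeRow y0 rest).2) := by
  induction rest with
  | nil =>
      intro tagged row y0
      simp [pvTakeRow, pvGroupRows, pvTagFrom]
  | cons a t ih =>
      intro tagged row y0
      by_cases h : (a.2.1 - y0).natAbs > 50
      · have hstep : pvStepB (tagged, row, some y0) a =
            (tagged ++ [(row + 1, a)], row + 1, some a.2.1) := by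
          simp [pvStepB, h]
        rw [List.foldl_cons, hstep, ih]
        simp only [pvTakeRow, h, if_pos]
        rw [pvGroupRows]
        simp [pvTagFrom, List.append_assoc]
      · have hstep : pvStepB (tagged, row, some y0) a = (tagged ++ [(row, a)], row, some y0) := by
          simp [pvStepB, h]
        rw [List.foldl_cons, hstep, ih]
        simp only [pvTakeRow, h, if_false]
        simp [List.append_assoc]

theorem pvB_out (d : List PvIt) :
    sort_detected_alt d = pvOut (pvGroupRows (PySem.List.sorted d (fun it => it.2.1))) := by
  rw [pvSortDetectedAlt_eq]
  cases hys : PySem.List.sorted d (fun it => it.2.1) with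
  | nil => simp [pvGroupRows, pvOut, pvSorted2_eq_foldl]
  | cons a t =>
      have hstep : pvStepB ([], 0, none) a = ([(0, a)], 0, some a.2.1) := rfl
      rw [List.foldl_cons, hstep, pvLB t [(0, a)] 0 a.2.1]
      have : ([(0, a)] : List (Int × PvIt)) ++ ((pvTakeRow a.2.1 t).1).map (fun it => ((0 : Int), it)) ++
          pvTagFrom (0 + 1) (pvGroupRows (pvTakeRow a.2.1 t).2) =
          pvTagFrom 0 (pvGroupRows (a :: t)) := by
        rw [pvGroupRows]
        simp [pvTagFrom]
      rw [this, pvSorted2_tagFrom]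

-- ===== VERDICT (by name: the statement is the Claim_ definition above) =====
theorem sort_detected_spec : Claim_equal_sort_detected := by
  intro d _
  unfold Spec_sort_detected
  rw [pvA_out, pvB_out]
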